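-- pv_equiv track=rewrite | github.com/SIDED00R/Code_training | 프로그래머스/3/12920. 선입 선출 스케줄링/선입 선출 스케줄링.py | solution
-- ===== SOURCE A (Python) =====
-- def solution(n, cores):
--     if len(cores) >= n:
--         return 0
--
--     max_time = 50000 * 10000 + 1
--     min_time = 0
--     find = True
--     while min_time + 1 < max_time:
--         total = 0
--         mid_time = (max_time + min_time) // 2
--         for core in cores:
--             total += (mid_time // core) + 1
--         if total >= n:
--             max_time = mid_time
--         else:
--             min_time = mid_time
--
--     count = 0
--     able = []
--     for idx, core in enumerate(cores):
--         count += (max_time // core) + 1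
--         if max_time % core == 0:
--             able.append(idx)
--     left = count - n
--     return able[-(left + 1)] + 1
-- ===== SOURCE B (Python) =====
-- def solution(n, cores):
--     k = len(cores)
--     if k >= n:
--         return 0
--     # simulate the FIFO schedule: the first k jobs start at time 0; thereafter each
--     # pop hands the next job to the earliest-free core (lowest index on ties)
--     nxt = list(cores)           # next time each core becomes free
--     jobs = n - k                # the n-th job overall is the (n-k)-th pop
--     while True:
--         best = 0
--         for i in range(1, k):
--             if nxt[i] < nxt[best]:
--                 best = i
--         jobs -= 1
--         if jobs == 0:
--             return best + 1
--         nxt[best] += cores[best]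
-- ===== Notes on version B (the rewrite author's own statement) =====
-- stated objective: alternative
-- what changed: B drops A's binary search over time and its able-list/negative-index phase entirely and instead simulates the FIFO schedule itself: it keeps each core's next-free time, repeatedly hands the next job to the earliest-free core (lowest index on ties) by a linear argmin scan, and returns the core that receives the n-th job.
-- outside the precondition, e.g. on solution(3, [2, -3]): A returns 1, B returns 2; on solution(4, [500000001, 500000002]): A returns 1, B returns 2
import Mathlib
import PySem

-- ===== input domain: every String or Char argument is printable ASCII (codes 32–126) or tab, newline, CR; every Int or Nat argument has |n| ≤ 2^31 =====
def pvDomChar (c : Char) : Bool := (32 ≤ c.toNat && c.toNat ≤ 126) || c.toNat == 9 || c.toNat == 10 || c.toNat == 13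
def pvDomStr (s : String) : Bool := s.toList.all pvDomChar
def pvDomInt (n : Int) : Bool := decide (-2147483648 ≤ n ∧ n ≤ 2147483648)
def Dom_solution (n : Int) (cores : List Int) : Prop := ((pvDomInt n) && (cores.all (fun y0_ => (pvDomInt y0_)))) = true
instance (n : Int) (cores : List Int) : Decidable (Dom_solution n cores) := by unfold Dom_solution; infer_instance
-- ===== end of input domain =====

-- B replaces A's binary search + able-list/negative-index phase with a direct simulation of the
-- FIFO schedule (next-free time per core, argmin pop with lowest-index ties); objective: alternative, not faster.

-- ===== PORT A =====
-- inner 'for core in cores: total += (mid_time // core) + 1' loop of A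
def aTotal (mid_time : Int) (cores : List Int) : Int :=
  cores.foldl (fun total core => total + (PySem.Int.floordiv mid_time core + 1)) 0

-- A's 'while min_time + 1 < max_time' binary search; returns the final max_time
def aSearch (n : Int) (cores : List Int) (min_time max_time : Int) : Int :=
  if min_time + 1 < max_time then
    if aTotal (PySem.Int.floordiv (max_time + min_time) 2) cores ≥ n then
      aSearch n cores min_time (PySem.Int.floordiv (max_time + min_time) 2)
    else
      aSearch n cores (PySem.Int.floordiv (max_time + min_time) 2) max_time
  else max_time
termination_by (max_time - min_time).toNat
decreasing_by
  all_goals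
    simp only [PySem.Int.floordiv_eq_ediv_of_pos (by norm_num : (0:Int) < 2)] at *
    omega

-- body of A's 'for idx, core in enumerate(cores)' loop (state = (count, able))
def aStep (max_time : Int) (st : Int × List Int) (p : Int × Int) : Int × List Int :=
  (st.1 + (PySem.Int.floordiv max_time p.2 + 1),
   if PySem.Int.mod max_time p.2 == 0 then st.2 ++ [p.1] else st.2)

def solution (n : Int) (cores : List Int) : Int :=
  if (cores.length : Int) ≥ n then 0
  else
    let max_time := aSearch n cores 0 (50000 * 10000 + 1)
    let st := (PySem.List.enumerate cores).foldl (aStep max_time) (0, [])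
    let left := st.1 - n
    -- able[-(left+1)] + 1 ; pyGet? none = IndexError, excluded by Pre_
    ((PySem.List.pyGet? st.2 (-(left + 1))).getD 0) + 1

-- ===== PORT B =====
-- Source B's inner 'best = 0; for i in range(1, k): if nxt[i] < nxt[best]: best = i' scan
-- (range(1, k) = List.range' 1 (k-1); both indices are always in range, so getD is exact)
def bArgmin (nxt : List Int) : Nat :=
  (List.range' 1 (nxt.length - 1)).foldl
    (fun best i => if nxt.getD i 0 < nxt.getD best 0 then i else best) 0

-- Source B's 'while True' pop loop over the remaining job count (jobs = n - k ≥ 1; 0 is unreachable)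
def bLoop (cores : List Int) : List Int → Nat → Int
  | nxt, 1 => (bArgmin nxt : Int) + 1
  | nxt, jobs + 2 =>
    let best := bArgmin nxt
    bLoop cores (nxt.set best (nxt.getD best 0 + cores.getD best 0)) (jobs + 1)
  | _, 0 => 0

def solution_alt (n : Int) (cores : List Int) : Int :=
  if (cores.length : Int) ≥ n then 0
  else bLoop cores cores (n - (cores.length : Int)).toNat

-- ===== PRECONDITION & SPEC =====
-- Pre_ excludes inputs (with n > len(cores)) holding a nonpositive core or an n beyond the job
-- capacity of A's hard-coded 5*10^8 search horizon: there A raises ZeroDivisionError/IndexError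
-- or, when its saturated search happens to index 'able' in range, returns an accidental value.
def Pre_solution (n : Int) (cores : List Int) : Prop :=
  n ≤ (cores.length : Int) ∨
    ((∀ c ∈ cores, 1 ≤ c) ∧ n ≤ (cores.map (fun c => 500000000 / c + 1)).sum)
instance (n : Int) (cores : List Int) : Decidable (Pre_solution n cores) := by
  unfold Pre_solution; infer_instance

def pvWitness_solution : Int × List Int := (5, [1, 2, 3])

def Spec_solution (n : Int) (cores : List Int) (out : Int) : Prop := out = solution_alt n cores
instance (n : Int) (cores : List Int) (out : Int) : Decidable (Spec_solution n cores out) := by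
  unfold Spec_solution; infer_instance

-- ===== CLAIM (what is proved, stated in full; the proofs are below) =====
def Claim_equal_solution : Prop := ∀ (n : Int) (cores : List Int),
  Dom_solution n cores → Pre_solution n cores → Spec_solution n cores (solution n cores)

-- ===== LEMMAS AND PROOFS =====

-- ---- A-side: characterise the binary search and the enumerate fold ----

def started (t : Int) (cores : List Int) : Int :=
  (cores.map (fun c => PySem.Int.floordiv t c + 1)).sum

lemma aTotal_eq (t : Int) (cores : List Int) : aTotal t cores = started t cores := by
  suffices h : ∀ (l : List Int) (a : Int),
      l.foldl (fun total core => total + (PySem.Int.floordiv t core + 1)) a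
        = a + (l.map (fun c => PySem.Int.floordiv t c + 1)).sum by
    simpa [aTotal, started] using h cores 0
  intro l
  induction l with
  | nil => simp
  | cons x xs ih => intro a; simp [List.foldl_cons, ih]; ring

lemma started_mono {cores : List Int} (hc : ∀ c ∈ cores, 1 ≤ c) {s t : Int} (h : s ≤ t) :
    started s cores ≤ started t cores := by
  induction cores with
  | nil => simp [started]
  | cons x xs ih =>
    have hx : (1:Int) ≤ x := hc x (by simp)
    have h1 : PySem.Int.floordiv s x ≤ PySem.Int.floordiv t x := by
      rw [PySem.Int.floordiv_eq_ediv_of_pos (by omega), PySem.Int.floordiv_eq_ediv_of_pos (by omega)]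
      exact Int.ediv_le_ediv (by omega) h
    have h2 := ih (fun c hcm => hc c (by simp [hcm]))
    simp only [started, List.map_cons, List.sum_cons] at *
    omega

lemma started_zero {cores : List Int} (hc : ∀ c ∈ cores, 1 ≤ c) :
    started 0 cores = (cores.length : Int) := by
  induction cores with
  | nil => simp [started]
  | cons x xs ih =>
    have hx : (1:Int) ≤ x := hc x (by simp)
    have h0 : PySem.Int.floordiv 0 x = 0 := by
      rw [PySem.Int.floordiv_eq_ediv_of_pos (by omega)]; simp
    have h2 := ih (fun c hcm => hc c (by simp [hcm]))
    simp [started, h0] at *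
    omega

-- per-core delta: for 1 ≤ c, T//c - (T-1)//c is 1 iff c divides T
lemma floordiv_delta {T c : Int} (hc : 1 ≤ c) :
    PySem.Int.floordiv T c - PySem.Int.floordiv (T - 1) c
      = (if PySem.Int.mod T c == 0 then 1 else 0) := by
  rw [PySem.Int.floordiv_eq_ediv_of_pos (by omega), PySem.Int.floordiv_eq_ediv_of_pos (by omega),
      PySem.Int.mod_eq_emod_of_pos (by omega)]
  have hq := Int.ediv_add_emod T c
  have hr0 : 0 ≤ T % c := Int.emod_nonneg T (by omega)
  have hrc : T % c < c := Int.emod_lt_of_pos T (by omega)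
  by_cases h : T % c = 0
  · have hT : T - 1 = (c - 1) + c * (T / c - 1) := by
      have hmul : c * (T / c - 1) = c * (T / c) - c := by ring
      omega
    have : (T - 1) / c = T / c - 1 := by
      rw [hT, Int.add_mul_ediv_left _ _ (by omega : c ≠ 0)]
      rw [Int.ediv_eq_zero_of_lt (by omega) (by omega)]; ring
    simp [h, this]
  · have hT : T - 1 = (T % c - 1) + c * (T / c) := by omega
    have : (T - 1) / c = T / c := by
      rw [hT, Int.add_mul_ediv_left _ _ (by omega : c ≠ 0)]
      rw [Int.ediv_eq_zero_of_lt (by omega) (by omega)]; ring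
    simp only [beq_iff_eq, h, if_false]
    omega

lemma started_delta {cores : List Int} (hc : ∀ c ∈ cores, 1 ≤ c) (T : Int) :
    started T cores - started (T - 1) cores
      = ((cores.countP (fun c => PySem.Int.mod T c == 0)) : Int) := by
  induction cores with
  | nil => simp [started]
  | cons x xs ih =>
    have hx : (1:Int) ≤ x := hc x (by simp)
    have h2 := ih (fun c hcm => hc c (by simp [hcm]))
    have hd := floordiv_delta (T := T) hx
    simp only [started, List.map_cons, List.sum_cons, List.countP_cons] at h2 ⊢
    push_cast
    split_ifs at hd ⊢ <;> omega

lemma aSearch_spec (n : Int) (cores : List Int) (mn mx : Int) :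
    started mn cores < n → n ≤ started mx cores → mn < mx →
      (n ≤ started (aSearch n cores mn mx) cores ∧
       started (aSearch n cores mn mx - 1) cores < n ∧
       0 < aSearch n cores mn mx - mn) := by
  fun_induction aSearch n cores mn mx with
  | case1 mn mx hlt htot ih =>
    intro h1 h2 h3
    rw [aTotal_eq] at htot
    have hmid : mn < PySem.Int.floordiv (mx + mn) 2 ∧ PySem.Int.floordiv (mx + mn) 2 < mx := by
      rw [PySem.Int.floordiv_eq_ediv_of_pos (by norm_num)]
      omega
    have := ih h1 htot hmid.1
    omega
  | case2 mn mx hlt htot ih =>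
    intro h1 h2 h3
    rw [aTotal_eq] at htot
    have hmid : mn < PySem.Int.floordiv (mx + mn) 2 ∧ PySem.Int.floordiv (mx + mn) 2 < mx := by
      rw [PySem.Int.floordiv_eq_ediv_of_pos (by norm_num)]
      omega
    push_neg at htot
    have := ih htot h2 hmid.2
    omega
  | case3 mn mx hlt =>
    intro h1 h2 h3
    have hmx : mx = mn + 1 := by omega
    subst hmx
    simp only [add_sub_cancel_right]
    omega

lemma threshold_unique {cores : List Int} (hc : ∀ c ∈ cores, 1 ≤ c) {n a b : Int}
    (ha1 : n ≤ started a cores) (ha2 : started (a - 1) cores < n)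
    (hb1 : n ≤ started b cores) (hb2 : started (b - 1) cores < n) : a = b := by
  rcases lt_trichotomy a b with h | h | h
  · have := started_mono hc (show a ≤ b - 1 by omega)
    omega
  · exact h
  · have := started_mono hc (show b ≤ a - 1 by omega)
    omega

lemma aFold_eq (T : Int) (xs : List Int) : ∀ (s c0 : Int) (ab0 : List Int),
    (PySem.List.enumerate xs s).foldl (aStep T) (c0, ab0)
      = (c0 + started T xs,
         ab0 ++ ((PySem.List.enumerate xs s).filter
                   (fun p => PySem.Int.mod T p.2 == 0)).map (fun p => p.1)) := by
  induction xs with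
  | nil => intro s c0 ab0; simp [PySem.List.enumerate_nil, started]
  | cons x l ih =>
    intro s c0 ab0
    rw [PySem.List.enumerate_cons]
    simp only [List.foldl_cons, List.filter_cons]
    by_cases h : PySem.Int.mod T x == 0
    · simp only [aStep, h, if_true]
      rw [ih]
      simp only [started, List.map_cons, List.sum_cons, List.append_assoc,
        List.singleton_append, List.map_cons, Prod.mk.injEq]
      exact ⟨by ring, trivial⟩
    · simp only [aStep, h, Bool.false_eq_true, if_false]
      rw [ih]
      simp only [started, List.map_cons, List.sum_cons, Prod.mk.injEq]
      exact ⟨by ring, trivial⟩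

lemma filter_enumerate_length (T : Int) (xs : List Int) : ∀ (s : Int),
    ((PySem.List.enumerate xs s).filter (fun p => PySem.Int.mod T p.2 == 0)).length
      = xs.countP (fun c => PySem.Int.mod T c == 0) := by
  induction xs with
  | nil => intro s; simp [PySem.List.enumerate_nil]
  | cons x l ih =>
    intro s
    rw [PySem.List.enumerate_cons]
    by_cases h : PySem.Int.mod T x == 0 <;> simp [List.filter_cons, h, ih, List.countP_cons]

-- the b-th entry of able: p holds at index b → able[(take b).countP p] = s + b
lemma filter_enumerate_getElem (pred : Int → Bool) (xs : List Int) : ∀ (s : Int) (b : Nat),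
    b < xs.length → pred (xs.getD b 0) = true →
    ((((PySem.List.enumerate xs s).filter (fun q => pred q.2)).map
        (fun p => p.1)))[(xs.take b).countP pred]? = some (s + (b : Int)) := by
  induction xs with
  | nil => intro s b hb hp; simp at hb
  | cons x l ih =>
    intro s b hb hp
    rw [PySem.List.enumerate_cons]
    cases b with
    | zero =>
      simp only [List.getD_cons_zero] at hp
      simp [List.filter_cons, hp]
    | succ b =>
      simp only [List.getD_cons_succ] at hp
      have hb' : b < l.length := by simpa using hb
      have hih := ih (s + 1) b hb' hp
      by_cases hpx : pred x = true
      · simp only [List.take_succ_cons, List.countP_cons, List.filter_cons, hpx, if_true,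
          List.map_cons, List.getElem?_cons_succ]
        rw [hih]
        congr 1
        push_cast
        ring
      · simp only [List.take_succ_cons, List.countP_cons, List.filter_cons, hpx,
          Bool.false_eq_true, if_false, Nat.add_zero]
        rw [hih]
        congr 1
        push_cast
        ring

-- the capacity sum in Pre_ is started 500000000
lemma preCap_eq {cores : List Int} (hc : ∀ c ∈ cores, 1 ≤ c) :
    (cores.map (fun c => 500000000 / c + 1)).sum = started 500000000 cores := by
  unfold started
  congr 1
  apply List.map_congr_left
  intro c hcm
  rw [PySem.Int.floordiv_eq_ediv_of_pos (by have := hc c hcm; omega)]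

-- ---- B-side: the simulation invariant ----

-- lexicographic order on (time, core index) pairs
def lexLt (t : Int) (i : Nat) (t' : Int) (i' : Nat) : Prop :=
  t < t' ∨ (t = t' ∧ i < i')

-- b is the FIRST index of a minimal entry of nxt below `bound`
def FirstMin (nxt : List Int) (b bound : Nat) : Prop :=
  b < bound ∧ (∀ i, i < bound → nxt.getD b 0 ≤ nxt.getD i 0) ∧
    (∀ i, i < b → nxt.getD b 0 < nxt.getD i 0)

lemma argmin_fold (nxt : List Int) : ∀ (m a b0 : Nat), FirstMin nxt b0 a →
    FirstMin nxt
      ((List.range' a m).foldl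
        (fun best i => if nxt.getD i 0 < nxt.getD best 0 then i else best) b0) (a + m) := by
  intro m
  induction m with
  | zero => intro a b0 h; simpa using h
  | succ m ih =>
    intro a b0 h
    obtain ⟨hb, hle, hlt⟩ := h
    rw [List.range'_succ, List.foldl_cons]
    have : a + (m + 1) = (a + 1) + m := by omega
    rw [this]
    apply ih
    by_cases hc : nxt.getD a 0 < nxt.getD b0 0
    · simp only [hc, if_true]
      refine ⟨by omega, ?_, ?_⟩
      · intro i hi
        rcases Nat.lt_succ_iff_lt_or_eq.mp hi with hi | hi
        · exact le_trans (le_of_lt hc) (hle i hi)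
        · subst hi; exact le_refl _
      · intro i hi
        exact lt_of_lt_of_le hc (hle i hi)
    · simp only [hc, if_false]
      refine ⟨by omega, ?_, hlt⟩
      intro i hi
      rcases Nat.lt_succ_iff_lt_or_eq.mp hi with hi | hi
      · exact hle i hi
      · subst hi; omega

lemma bArgmin_spec (nxt : List Int) (h : 1 ≤ nxt.length) :
    FirstMin nxt (bArgmin nxt) nxt.length := by
  have h0 : FirstMin nxt 0 1 := by
    refine ⟨by omega, ?_, by omega⟩
    intro i hi
    interval_cases i
    exact le_refl _
  have := argmin_fold nxt (nxt.length - 1) 1 0 h0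
  have hlen : 1 + (nxt.length - 1) = nxt.length := by omega
  rw [hlen] at this
  exact this

-- simulation invariant after m pops: nxt[i] = cores[i] * (p[i] + 1) with p the per-core pop
-- counts, Σ p = m, and the popped set downward closed in (time, index) lexicographic order
def SimInv (cores nxt : List Int) (m : Nat) : Prop :=
  ∃ p : List Nat, p.length = cores.length ∧
    nxt = List.zipWith (fun (c : Int) (q : Nat) => c * ((q : Int) + 1)) cores p ∧
    p.sum = m ∧
    (∀ i j, i < cores.length → j < cores.length → 1 ≤ p.getD j 0 →
      lexLt (cores.getD j 0 * (p.getD j 0 : Int)) j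
            (cores.getD i 0 * ((p.getD i 0 : Int) + 1)) i)

lemma zipWith_replicate_zero (cores : List Int) :
    List.zipWith (fun (c : Int) (q : Nat) => c * ((q : Int) + 1)) cores
      (List.replicate cores.length 0) = cores := by
  induction cores with
  | nil => simp
  | cons x l ih => simp [List.replicate_succ, ih]

lemma simInv_zero (cores : List Int) : SimInv cores cores 0 := by
  refine ⟨List.replicate cores.length 0, by simp, (zipWith_replicate_zero cores).symm, by simp, ?_⟩
  intro i j hi hj hp
  simp [List.getD_replicate] at hp

lemma getD_zip (cores : List Int) (p : List Nat) (i : Nat)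
    (hp : p.length = cores.length) (hi : i < cores.length) :
    (List.zipWith (fun (c : Int) (q : Nat) => c * ((q : Int) + 1)) cores p).getD i 0
      = cores.getD i 0 * ((p.getD i 0 : Int) + 1) := by
  have hi2 : i < p.length := by omega
  have hlen : i < (List.zipWith (fun (c : Int) (q : Nat) => c * ((q : Int) + 1)) cores p).length := by
    rw [List.length_zipWith]; omega
  rw [List.getD_eq_getElem _ _ hlen, List.getD_eq_getElem _ _ hi, List.getD_eq_getElem _ _ hi2,
    List.getElem_zipWith]

lemma sum_set_succ : ∀ (p : List Nat) (b : Nat), b < p.length →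
    (p.set b (p.getD b 0 + 1)).sum = p.sum + 1 := by
  intro p
  induction p with
  | nil => intro b hb; simp at hb
  | cons x l ih =>
    intro b hb
    cases b with
    | zero => simp [List.set_cons_zero]; omega
    | succ b =>
      simp only [List.getD_cons_succ, List.set_cons_succ, List.sum_cons]
      rw [ih b (by simpa using hb)]
      omega

lemma core_pos {cores : List Int} (hc : ∀ c ∈ cores, 1 ≤ c) {i : Nat} (hi : i < cores.length) :
    1 ≤ cores.getD i 0 := by
  rw [List.getD_eq_getElem _ _ hi]
  exact hc _ (List.getElem_mem hi)

lemma zipWith_set : ∀ (cores : List Int) (p : List Nat) (b : Nat) (v : Nat),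
    b < cores.length → p.length = cores.length →
    List.zipWith (fun (c : Int) (q : Nat) => c * ((q : Int) + 1)) cores (p.set b v)
      = (List.zipWith (fun (c : Int) (q : Nat) => c * ((q : Int) + 1)) cores p).set b
          (cores.getD b 0 * ((v : Int) + 1)) := by
  intro cores
  induction cores with
  | nil => intro p b v hb; simp at hb
  | cons c cs ih =>
    intro p b v hb hlen
    cases p with
    | nil => simp at hlen
    | cons q p' =>
      cases b with
      | zero => simp
      | succ b =>
        simp only [List.set_cons_succ, List.zipWith_cons_cons, List.getD_cons_succ]
        rw [ih p' b v (by simpa using hb) (by simpa using hlen)]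

lemma simInv_step {cores nxt : List Int} {m : Nat} (hc : ∀ c ∈ cores, 1 ≤ c)
    (hk : 1 ≤ cores.length) (hInv : SimInv cores nxt m) :
    SimInv cores
      (nxt.set (bArgmin nxt) (nxt.getD (bArgmin nxt) 0 + cores.getD (bArgmin nxt) 0)) (m + 1) := by
  obtain ⟨p, hplen, hnxt, hsum, hDC⟩ := hInv
  have hnlen : nxt.length = cores.length := by rw [hnxt, List.length_zipWith]; omega
  have hFM := bArgmin_spec nxt (by omega)
  set b := bArgmin nxt with hbdef
  obtain ⟨hbk', hble, hblt⟩ := hFM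
  have hbk : b < cores.length := by omega
  have hvals : ∀ i, i < cores.length → nxt.getD i 0 = cores.getD i 0 * ((p.getD i 0 : Int) + 1) := by
    intro i hi; rw [hnxt]; exact getD_zip cores p i hplen hi
  have hcb : 1 ≤ cores.getD b 0 := core_pos hc hbk
  have hgetD : ∀ x, x < cores.length → (p.set b (p.getD b 0 + 1)).getD x 0
      = if b = x then p.getD b 0 + 1 else p.getD x 0 := by
    intro x hx
    rw [List.getD_eq_getElem _ _ (by simp only [List.length_set]; omega), List.getElem_set]
    by_cases hbx : b = x
    · simp [hbx]
    · simp only [if_neg hbx]; exact (List.getD_eq_getElem _ _ (by omega)).symm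
  refine ⟨p.set b (p.getD b 0 + 1), by simpa using hplen, ?_, ?_, ?_⟩
  · -- new state is the zip of the bumped p
    rw [zipWith_set cores p b (p.getD b 0 + 1) hbk hplen, ← hnxt]
    congr 1
    rw [hvals b hbk]
    push_cast
    ring
  · rw [sum_set_succ p b (by omega)]; omega
  · -- downward closedness is preserved
    intro i j hi hj hpj
    rw [hgetD i hi, hgetD j hj]
    rw [hgetD j hj] at hpj
    by_cases hjb : b = j
    · subst hjb
      simp only [if_pos rfl] at *
      have htb := hvals b hbk
      by_cases hib : b = i
      · subst hib
        simp only [if_pos rfl]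
        left
        push_cast
        nlinarith [hcb]
      · simp only [if_neg hib]
        have hle := hble i (by omega)
        have hvi := hvals i hi
        rw [hvi] at hle
        rcases lt_or_eq_of_le hle with h | h
        · left; push_cast; rw [← htb] at *; omega
        · right
          refine ⟨by push_cast; rw [← htb] at *; omega, ?_⟩
          rcases Nat.lt_or_ge b i with hlt | hge
          · exact hlt
          · exfalso
            have : i < b := by omega
            have := hblt i this
            rw [hvi] at this
            omega
    · simp only [if_neg hjb] at *
      have hold := hDC i j hi hj hpj
      by_cases hib : b = i
      · subst hib
        simp only [if_pos rfl]
        have htb := hvals b hbk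
        rcases hold with h | ⟨h, h2⟩
        · left; push_cast at *; nlinarith [hcb]
        · left; push_cast at *; nlinarith [hcb]
      · simpa [if_neg hib] using hold

lemma bLoop_run (cores : List Int) (hc : ∀ c ∈ cores, 1 ≤ c) (hk : 1 ≤ cores.length) :
    ∀ (j : Nat) (nxt : List Int) (m : Nat), SimInv cores nxt m →
      ∃ nxt', SimInv cores nxt' (m + j) ∧ bLoop cores nxt (j + 1) = (bArgmin nxt' : Int) + 1 := by
  intro j
  induction j with
  | zero => intro nxt m hInv; exact ⟨nxt, by simpa using hInv, rfl⟩
  | succ j ih =>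
    intro nxt m hInv
    obtain ⟨nxt', h1, h2⟩ := ih _ (m + 1) (simInv_step hc hk hInv)
    refine ⟨nxt', by
      have hmm : m + 1 + j = m + (j + 1) := by omega
      rw [hmm] at h1; exact h1, ?_⟩
    simpa [bLoop] using h2

lemma started_split (s : Int) : ∀ (cs : List Int),
    started s cs = (cs.map (fun c => PySem.Int.floordiv s c)).sum + (cs.length : Int) := by
  intro cs
  induction cs with
  | nil => simp [started]
  | cons x l ih =>
    simp only [started, List.map_cons, List.sum_cons, List.length_cons] at *
    push_cast
    omega

-- pointwise description of the pop counts sums to the started/countP identity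
lemma sum_split (f : Int → Int) (pred : Int → Bool) :
    ∀ (cs : List Int) (p : List Nat) (b : Nat), p.length = cs.length →
    (∀ j, j < cs.length → ((p.getD j 0 : Int)) = f (cs.getD j 0)
        + (if j < b ∧ pred (cs.getD j 0) = true then 1 else 0)) →
    (p.map (fun (q : Nat) => (q : Int))).sum
      = (cs.map f).sum + (((cs.take b).countP pred : Nat) : Int) := by
  intro cs
  induction cs with
  | nil =>
    intro p b hlen hpt
    rw [List.eq_nil_iff_length_eq_zero.mpr hlen]
    simp
  | cons c cs' ih =>
    intro p b hlen hpt
    cases p with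
    | nil => simp at hlen
    | cons q p' =>
      have h0 := hpt 0 (by simp)
      simp only [List.getD_cons_zero] at h0
      cases b with
      | zero =>
        have htail : ∀ j, j < cs'.length → ((p'.getD j 0 : Int)) = f (cs'.getD j 0)
            + (if j < 0 ∧ pred (cs'.getD j 0) = true then 1 else 0) := by
          intro j hj
          have := hpt (j + 1) (by simp; omega)
          simpa using this
        simp only [Nat.not_lt_zero, false_and, if_false] at h0
        rw [List.take_zero]
        simp only [List.map_cons, List.sum_cons, List.countP_nil]
        rw [ih p' 0 (by simpa using hlen) htail]
        simp
        omega
      | succ b =>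
        have htail : ∀ j, j < cs'.length → ((p'.getD j 0 : Int)) = f (cs'.getD j 0)
            + (if j < b ∧ pred (cs'.getD j 0) = true then 1 else 0) := by
          intro j hj
          have := hpt (j + 1) (by simp; omega)
          simpa [Nat.succ_lt_succ_iff] using this
        simp only [Nat.zero_lt_succ, true_and] at h0
        rw [List.take_succ_cons]
        simp only [List.map_cons, List.sum_cons, List.countP_cons]
        rw [ih p' b (by simpa using hlen) htail]
        by_cases hpc : pred c = true
        · simp only [hpc, if_true] at h0 ⊢
          push_cast
          omega
        · simp only [hpc, Bool.false_eq_true, if_false] at h0 ⊢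
          push_cast
          omega

-- extraction: at a state reached after m pops, the popped pair count below the next pop
-- (t*, b) is m, expressed through started (t* - 1) and the divisor prefix count
lemma simInv_extract {cores nxt : List Int} {m : Nat} (hc : ∀ c ∈ cores, 1 ≤ c)
    (hk : 1 ≤ cores.length) (hInv : SimInv cores nxt m) :
    bArgmin nxt < cores.length ∧
    1 ≤ nxt.getD (bArgmin nxt) 0 ∧
    PySem.Int.mod (nxt.getD (bArgmin nxt) 0) (cores.getD (bArgmin nxt) 0) == 0 ∧
    (m : Int) + (cores.length : Int)
      = started (nxt.getD (bArgmin nxt) 0 - 1) cores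
        + ((cores.take (bArgmin nxt)).countP
            (fun c => PySem.Int.mod (nxt.getD (bArgmin nxt) 0) c == 0) : Int) := by
  obtain ⟨p, hplen, hnxt, hsum, hDC⟩ := hInv
  have hnlen : nxt.length = cores.length := by rw [hnxt, List.length_zipWith]; omega
  have hFM := bArgmin_spec nxt (by omega)
  set b := bArgmin nxt with hbdef
  obtain ⟨hbk', hble, hblt⟩ := hFM
  have hbk : b < cores.length := by omega
  have hvals : ∀ i, i < cores.length → nxt.getD i 0 = cores.getD i 0 * ((p.getD i 0 : Int) + 1) := by
    intro i hi; rw [hnxt]; exact getD_zip cores p i hplen hi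
  have hcb : 1 ≤ cores.getD b 0 := core_pos hc hbk
  set t := nxt.getD b 0 with htdef
  have htb : t = cores.getD b 0 * ((p.getD b 0 : Int) + 1) := hvals b hbk
  have ht1 : 1 ≤ t := by rw [htb]; nlinarith [hcb]
  have hdvd : cores.getD b 0 ∣ t := ⟨(p.getD b 0 : Int) + 1, htb⟩
  refine ⟨hbk, ht1, ?_, ?_⟩
  · simpa [PySem.Int.mod_eq_zero_iff_dvd] using hdvd
  · -- pointwise pop-count description
    have hpoint : ∀ j, j < cores.length → ((p.getD j 0 : Int))
        = PySem.Int.floordiv (t - 1) (cores.getD j 0)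
          + (if j < b ∧ (PySem.Int.mod t (cores.getD j 0) == 0) = true then 1 else 0) := by
      intro j hj
      have hcj : 1 ≤ cores.getD j 0 := core_pos hc hj
      set c := cores.getD j 0 with hcdef
      set q := (p.getD j 0 : Int) with hqdef
      have hq0 : 0 ≤ q := by rw [hqdef]; positivity
      have hub : t ≤ c * (q + 1) := by
        have := hble j (by omega)
        rw [hvals j hj] at this
        exact this
      -- strict upper bound on the popped part: c*q < t, or c*q = t with j < b
      have hlow : c * q < t ∨ (c * q = t ∧ j < b) := by
        by_cases hq1 : 1 ≤ p.getD j 0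
        · have := hDC b j hbk hj hq1
          rw [← htb] at this
          rcases this with h | ⟨h, h2⟩
          · left; rw [← hqdef] at h; exact h
          · right; exact ⟨by rw [← hqdef] at h; exact h, h2⟩
        · left
          have : p.getD j 0 = 0 := by omega
          rw [hqdef, this]
          simpa using ht1
      by_cases hjb : j < b
      · -- q = t // c, and the delta lemma moves to (t-1) // c
        have hqle : c * q ≤ t := by rcases hlow with h | ⟨h, _⟩ <;> omega
        have hstrict : t < c * (q + 1) := by
          have := hblt j hjb
          rw [hvals j hj] at this
          exact this
        have hfd : PySem.Int.floordiv t c = q :=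
          (PySem.Int.floordiv_eq_iff_of_pos (by omega)).mpr ⟨by linarith [hqle], by linarith [hstrict]⟩
        have hdelta := floordiv_delta (T := t) (c := c) hcj
        simp only [hjb, true_and]
        by_cases hm : (PySem.Int.mod t c == 0) = true
        · rw [if_pos hm]
          rw [if_pos hm] at hdelta
          omega
        · rw [if_neg hm]
          rw [if_neg hm] at hdelta
          omega
      · -- q = (t-1) // c
        have hqlt : c * q < t := by
          rcases hlow with h | ⟨h, h2⟩
          · exact h
          · omega
        have hfd : PySem.Int.floordiv (t - 1) c = q :=
          (PySem.Int.floordiv_eq_iff_of_pos (by omega)).mpr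
            ⟨by linarith [hqlt], by linarith [hub]⟩
        simp only [hjb, false_and, if_false]
        omega
    have hsum2 := sum_split (fun c => PySem.Int.floordiv (t - 1) c)
      (fun c => PySem.Int.mod t c == 0) cores p b hplen hpoint
    rw [← Nat.cast_list_sum, hsum] at hsum2
    rw [started_split (t - 1) cores]
    omega

-- ===== VERDICT (by name: the statement is the Claim_ definition above) =====
theorem solution_spec : Claim_equal_solution := by
  unfold Claim_equal_solution
  intro n cores _ hpre
  unfold Spec_solution solution solution_alt
  by_cases hk : (cores.length : Int) ≥ n
  · simp [hk]
  · simp only [hk, if_false]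
    rcases hpre with h | ⟨hc, hcap⟩
    · omega
    rw [preCap_eq hc] at hcap
    have hklen : 1 ≤ cores.length := by
      by_contra h0
      have hnil : cores = [] := by
        cases cores with
        | nil => rfl
        | cons x l => simp at h0
      rw [hnil] at hcap hk
      simp [started] at hcap hk
      omega
    -- A's binary search finds the unique threshold time
    have hmonoA : n ≤ started 500000001 cores := le_trans hcap (started_mono hc (by norm_num))
    have hS0 : started 0 cores < n := by rw [started_zero hc]; omega
    have hA := aSearch_spec n cores 0 (50000 * 10000 + 1) hS0 (by norm_num [hmonoA]) (by norm_num)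
    set T := aSearch n cores 0 (50000 * 10000 + 1) with hTdef
    -- B's simulation runs n - k pops from the initial state
    obtain ⟨j, hjeq⟩ : ∃ j : Nat, (n - (cores.length : Int)).toNat = j + 1 :=
      ⟨(n - (cores.length : Int) - 1).toNat, by omega⟩
    rw [hjeq]
    obtain ⟨nxt', hInv', hrun⟩ := bLoop_run cores hc hklen j cores 0 (simInv_zero cores)
    rw [hrun]
    rw [Nat.zero_add] at hInv'
    obtain ⟨hbk, ht1, hmod, hid⟩ := simInv_extract hc hklen hInv'
    set b := bArgmin nxt' with hbdef
    set t := nxt'.getD b 0 with htdef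
    have hjint : (j : Int) = n - (cores.length : Int) - 1 := by omega
    -- t is a threshold for n, hence equals T
    have hDcast : (0 : Int) ≤ ((cores.take b).countP (fun c => PySem.Int.mod t c == 0) : Int) := by positivity
    have hdelta := started_delta hc t
    have hDall : cores.countP (fun c => PySem.Int.mod t c == 0)
        = (cores.take b).countP (fun c => PySem.Int.mod t c == 0)
          + (cores.drop b).countP (fun c => PySem.Int.mod t c == 0) := by
      rw [← List.countP_append, List.take_append_drop]
    have hcbmem : cores.getD b 0 ∈ cores.drop b := by
      have h0 : (cores.drop b)[0]'(by simp; omega) = cores[b] := by simp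
      rw [List.getD_eq_getElem _ _ hbk, ← h0]
      exact List.getElem_mem _
    have hDrop1 : 1 ≤ (cores.drop b).countP (fun c => PySem.Int.mod t c == 0) :=
      List.countP_pos_iff.mpr ⟨cores.getD b 0, hcbmem, hmod⟩
    have hT1 : started (t - 1) cores < n := by omega
    have hT2 : n ≤ started t cores := by omega
    have hteq : T = t := threshold_unique hc hA.1 hA.2.1 hT2 hT1
    -- A's second phase
    rw [aFold_eq T cores 0 0 []]
    simp only [List.nil_append, zero_add]
    rw [hteq]
    set able := (((PySem.List.enumerate cores).filter
        (fun p => PySem.Int.mod t p.2 == 0)).map (fun p => p.1)) with hable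
    set left := started t cores - n with hleft
    have hablen : able.length = cores.countP (fun c => PySem.Int.mod t c == 0) := by
      rw [hable, List.length_map, filter_enumerate_length]
    have hleft0 : 0 ≤ left := by omega
    have hleftlt : (left : Int) + 1 ≤ (able.length : Int) := by
      rw [hablen]; omega
    have hnegidx : (-(left + 1)) = -((((left + 1).toNat : Nat)) : Int) := by omega
    rw [hnegidx, PySem.List.pyGet?_neg_natCast able (left + 1).toNat (by omega) (by omega)]
    have hidx : able.length - (left + 1).toNat
        = (cores.take b).countP (fun c => PySem.Int.mod t c == 0) := by
      omega
    rw [hidx]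
    have hget := filter_enumerate_getElem (fun c => PySem.Int.mod t c == 0) cores 0 b hbk hmod
    rw [hable, hget]
    simp
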